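-- pv_equiv track=rewrite | github.com/sudhishhreddyy/Astuto_SudhishReddy | q3.py | find_overloaded_users
-- ===== SOURCE A (Python) =====
-- def find_overloaded_users(events):
--     user_events = {}
--     for user_id, timestamp in events:
--         if user_id not in user_events:
--             user_events[user_id] = []
--         user_events[user_id].append(timestamp)
--
--     overloaded_users = set()
--
--     for user_id, timestamps in user_events.items():
--         timestamps.sort()
--
--         for i in range(len(timestamps) - 2):
--             if timestamps[i + 2] - timestamps[i] < 10:
--                 overloaded_users.add(user_id)
--                 break
--
--     return overloaded_users
-- ===== SOURCE B (Python) =====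
-- def find_overloaded_users(events):
--     # first-appearance order of distinct users
--     order = []
--     for user_id, _ in events:
--         if user_id not in order:
--             order.append(user_id)
--
--     def overloaded(user_id):
--         ts = sorted(t for u, t in events if u == user_id)
--         return any(b - a < 10 for a, b in zip(ts, ts[2:]))
--
--     return {u for u in order if overloaded(u)}
-- ===== Notes on version B (the rewrite author's own statement) =====
-- stated objective: alternative
-- what changed: Replaces A's dict-of-lists grouping followed by a per-user indexed break-loop with a distinct-users pass plus a per-user filter/sort and a zip-of-adjacent-windows any().
import Mathlib
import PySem

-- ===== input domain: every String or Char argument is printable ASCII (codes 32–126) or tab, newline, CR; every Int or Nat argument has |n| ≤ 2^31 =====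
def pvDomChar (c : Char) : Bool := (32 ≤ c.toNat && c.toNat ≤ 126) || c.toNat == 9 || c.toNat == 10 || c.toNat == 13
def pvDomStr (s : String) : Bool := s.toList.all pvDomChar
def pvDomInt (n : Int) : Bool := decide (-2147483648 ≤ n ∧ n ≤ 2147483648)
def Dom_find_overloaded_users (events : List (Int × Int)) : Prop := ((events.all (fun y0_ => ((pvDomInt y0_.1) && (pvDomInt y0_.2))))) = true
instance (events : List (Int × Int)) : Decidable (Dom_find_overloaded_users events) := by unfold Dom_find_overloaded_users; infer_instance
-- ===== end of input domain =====

-- B replaces A's dict-of-lists grouping and indexed break-loop by a distinct-user pass plus a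
-- per-user filter/sort and a zip-adjacency any (alternative decomposition, same return value).

-- ===== PORT A =====
-- grouping loop: if user_id not in d: d[user_id] = [] ; d[user_id].append(timestamp)
def pvAGroup (events : List (Int × Int)) : PySem.Dict Int (List Int) :=
  events.foldl
    (fun d p =>
      let d' := if d.contains p.1 then d else d.insert p.1 ([] : List Int)
      d'.modify p.1 [] (fun l => l ++ [p.2]))
    PySem.Dict.empty

-- inner 'for i in range(len(ts)-2): if ts[i+2]-ts[i] < 10: … break'
def pvAScan (ts : List Int) : List Int → Bool
  | [] => false
  | i :: rest =>
      if PySem.List.pyGetD ts (i + 2) 0 - PySem.List.pyGetD ts i 0 < 10 then true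
      else pvAScan ts rest

def find_overloaded_users (events : List (Int × Int)) : List Int :=
  (pvAGroup events).items.foldl
    (fun acc kv =>
      if pvAScan (PySem.List.sorted kv.2 (fun x => x) false)
          (PySem.List.pyRange 0 (((PySem.List.sorted kv.2 (fun x => x) false).length : Int) - 2) 1)
      then PySem.Set.add acc kv.1 else acc)
    PySem.Set.empty

-- ===== PORT B =====
def pvBOverloaded (events : List (Int × Int)) (u : Int) : Bool :=
  let ts := PySem.List.sorted ((events.filter (fun p => p.1 == u)).map (fun p => p.2)) (fun x => x) false
  (ts.zip (ts.drop 2)).any (fun q => q.2 - q.1 < 10)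

def find_overloaded_users_alt (events : List (Int × Int)) : List Int :=
  PySem.Set.ofList
    ((events.foldl (fun s p => if s.contains p.1 then s else s ++ [p.1]) ([] : List Int)).filter
      (fun u => pvBOverloaded events u))

-- ===== PRECONDITION & SPEC =====
def Spec_find_overloaded_users (events : List (Int × Int)) (out : List Int) : Prop := out = find_overloaded_users_alt events
instance (events : List (Int × Int)) (out : List Int) : Decidable (Spec_find_overloaded_users events out) := by unfold Spec_find_overloaded_users; infer_instance

-- ===== CLAIM (what is proved, stated in full; the proofs are below) =====
def Claim_equal_find_overloaded_users : Prop := ∀ (events : List (Int × Int)), Dom_find_overloaded_users events → Spec_find_overloaded_users events (find_overloaded_users events)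

-- ===== LEMMAS AND PROOFS =====

-- A's conditional-insert-then-append step is exactly Dict.modify with default []
theorem pvAGroup_eq_modify (events : List (Int × Int)) :
    pvAGroup events =
      events.foldl (fun d p => d.modify p.1 [] (fun l => l ++ [p.2])) PySem.Dict.empty := by
  unfold pvAGroup
  apply PySem.List.foldl_congr_mem'
  intro p _ d
  by_cases h : d.contains p.1 = true
  · simp [h]
  · simp only [Bool.not_eq_true] at h
    simp only [h]
    simp [PySem.Dict.modify, PySem.Dict.getD_of_not_contains _ _ h,
      PySem.Dict.getD_insert_self, PySem.Dict.insert_insert_self]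

theorem pvAGroup_getD (events : List (Int × Int)) (u : Int) :
    (pvAGroup events).getD u [] = (events.filter (fun p => p.1 == u)).map (fun p => p.2) := by
  rw [pvAGroup_eq_modify, PySem.Dict.getD_foldl_modify_append]
  simp [PySem.Dict.getD_empty]

theorem pvAGroup_keys (events : List (Int × Int)) :
    (pvAGroup events).keys = PySem.Set.ofList (events.map (fun p => p.1)) := by
  rw [pvAGroup_eq_modify]
  rw [PySem.Dict.keys_foldl_modify_key events (fun p => p.1) [] (fun _ p l => l ++ [p.2])]
  simp [PySem.Dict.keys_empty, PySem.Set.update, PySem.Set.ofList_eq_foldl]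

theorem pvAGroup_keys_nodup (events : List (Int × Int)) : (pvAGroup events).keys.Nodup := by
  rw [pvAGroup_eq_modify]
  exact PySem.Dict.nodup_keys_foldl_modify_key events (fun p => p.1) [] (fun _ p l => l ++ [p.2])
    PySem.Dict.empty (by simp)

-- A's break-loop over range(len-2) is the adjacency 'any' over zip(ts, ts[2:])
theorem pvAScan_any (ts : List Int) (idxs : List Int) :
    pvAScan ts idxs = idxs.any (fun i => PySem.List.pyGetD ts (i + 2) 0 - PySem.List.pyGetD ts i 0 < 10) := by
  induction idxs with
  | nil => rfl
  | cons i rest ih =>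
      simp only [pvAScan, List.any_cons, ih]
      by_cases h : PySem.List.pyGetD ts (i + 2) 0 - PySem.List.pyGetD ts i 0 < 10 <;> simp [h]

theorem pvScan_eq_zip (ts : List Int) :
    pvAScan ts (PySem.List.pyRange 0 ((ts.length : Int) - 2) 1) =
      (ts.zip (ts.drop 2)).any (fun q => q.2 - q.1 < 10) := by
  rw [pvAScan_any]
  apply Bool.coe_iff_coe.mp
  simp only [List.any_eq_true]
  constructor
  · rintro ⟨i, hi, hlt⟩
    rw [PySem.List.mem_pyRange_one] at hi
    obtain ⟨h0, h2⟩ := hi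
    refine ⟨(ts[i.toNat]'(by omega), (ts.drop 2)[i.toNat]'(by simp; omega)), ?_, ?_⟩
    · have hlen : i.toNat < (ts.zip (ts.drop 2)).length := by simp [List.length_zip]; omega
      have := List.getElem_zip (l := ts) (l' := ts.drop 2) (i := i.toNat) (h := hlen)
      exact this ▸ List.getElem_mem hlen
    · simp only [List.getElem_drop]
      rw [PySem.List.pyGetD_eq_getElem ts 0 (by omega) (by omega),
        PySem.List.pyGetD_eq_getElem ts 0 h0 (by omega)] at hlt
      simpa [show (i+2).toNat = 2 + i.toNat by omega] using hlt
  · rintro ⟨q, hq, hlt⟩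
    obtain ⟨k, hk, hqeq⟩ := List.mem_iff_getElem.mp hq
    have hkl : k + 2 < ts.length := by
      simp [List.length_zip] at hk; omega
    refine ⟨(k : Int), ?_, ?_⟩
    · rw [PySem.List.mem_pyRange_one]; constructor <;> [positivity; (push_cast; omega)]
    · rw [PySem.List.pyGetD_eq_getElem ts 0 (by positivity) (by omega),
        PySem.List.pyGetD_eq_getElem ts 0 (by positivity) (by omega)]
      have := List.getElem_zip (l := ts) (l' := ts.drop 2) (i := k) (h := hk)
      rw [this] at hqeq
      subst hqeq
      simp only [List.getElem_drop] at hlt ⊢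
      simpa [show ((k : Int) + 2).toNat = 2 + k by omega, show ((k : Int)).toNat = k by omega] using hlt

-- conditional Set.add over a Nodup list is filter
theorem foldl_add_filter (p : Int → Bool) :
    ∀ (l : List Int) (acc : List Int), l.Nodup → (∀ x ∈ l, x ∉ acc) →
      l.foldl (fun s x => if p x then PySem.Set.add s x else s) acc = acc ++ l.filter p := by
  intro l
  induction l with
  | nil => intro acc _ _; simp
  | cons x rest ih =>
      intro acc hnd hdisj
      simp only [List.foldl_cons, List.filter_cons]
      by_cases hp : p x = true
      · rw [hp, if_pos rfl]
        have hx : PySem.Set.add acc x = acc ++ [x] := by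
          simp [PySem.Set.add, List.contains_eq_mem, hdisj x (by simp)]
        rw [hx, ih (acc ++ [x]) hnd.of_cons ?_]
        · simp
        · intro y hy
          simp only [List.mem_append, List.mem_singleton]
          rintro (h | rfl)
          · exact hdisj y (by simp [hy]) h
          · exact (List.nodup_cons.mp hnd).1 hy
      · simp only [Bool.not_eq_true] at hp
        rw [hp]
        simp only [if_false, Bool.false_eq_true]
        exact ih acc hnd.of_cons (fun y hy => hdisj y (by simp [hy]))

theorem pred_eq (events : List (Int × Int)) (u : Int) :
    (pvAScan (PySem.List.sorted ((pvAGroup events).getD u []) (fun x => x) false)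
      (PySem.List.pyRange 0 (((PySem.List.sorted ((pvAGroup events).getD u []) (fun x => x) false).length : Int) - 2) 1))
      = pvBOverloaded events u := by
  rw [pvScan_eq_zip, pvAGroup_getD, pvBOverloaded]

-- ===== VERDICT (by name: the statement is the Claim_ definition above) =====
theorem find_overloaded_users_spec : Claim_equal_find_overloaded_users := by
  intro events _
  unfold Spec_find_overloaded_users find_overloaded_users find_overloaded_users_alt
  have horder : events.foldl (fun s p => if s.contains p.1 then s else s ++ [p.1]) ([] : List Int)
      = (pvAGroup events).keys := by
    rw [pvAGroup_keys, PySem.Set.ofList_eq_foldl, List.foldl_map]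
    apply PySem.List.foldl_congr_mem'
    intro p _ s
    simp [PySem.Set.add]
  rw [PySem.Dict.items_eq_map_keys (pvAGroup events) (pvAGroup_keys_nodup events) []]
  rw [List.foldl_map]
  have hkeys := pvAGroup_keys_nodup events
  calc ((pvAGroup events).keys.foldl
        (fun acc k =>
          let ts := PySem.List.sorted ((pvAGroup events).getD k []) (fun x => x) false
          if pvAScan ts (PySem.List.pyRange 0 ((ts.length : Int) - 2) 1) then PySem.Set.add acc k else acc)
        PySem.Set.empty)
      = (pvAGroup events).keys.foldl
          (fun acc k => if pvBOverloaded events k then PySem.Set.add acc k else acc)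
          PySem.Set.empty := by
        apply PySem.List.foldl_congr_mem'
        intro k _ acc
        simp only [pred_eq events k]
    _ = [] ++ (pvAGroup events).keys.filter (fun u => pvBOverloaded events u) :=
        foldl_add_filter _ _ _ hkeys (by simp [PySem.Set.empty])
    _ = PySem.Set.ofList (((pvAGroup events).keys).filter (fun u => pvBOverloaded events u)) := by
        rw [PySem.Set.ofList_eq_self_of_nodup _ (hkeys.filter _)]
        simp
  rw [horder]
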